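-- pv_equiv track=rewrite | github.com/MichaelWave369/Vibe | vibe/synthesis.py | _python_readability_variant
-- ===== SOURCE A (Python) =====
-- def _python_readability_variant(code: str) -> str:
--     lines = code.splitlines()
--     out: list[str] = []
--     inserted = False
--     for line in lines:
--         out.append(line)
--         if line.startswith("def ") and not inserted:
--             out.append("    # Synthesis strategy: readability-biased")
--             inserted = True
--     if not inserted:
--         out.append("# Synthesis strategy: readability-biased")
--     return "\n".join(out) + "\n"
-- ===== SOURCE B (Python) =====
-- def _python_readability_variant(code: str) -> str:
--     lines = code.splitlines()
--     i = next((k for k, ln in enumerate(lines) if ln.startswith("def ")), None)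
--     if i is None:
--         result = lines + ["# Synthesis strategy: readability-biased"]
--     else:
--         result = lines[:i + 1] + ["    # Synthesis strategy: readability-biased"] + lines[i + 1:]
--     return "\n".join(result) + "\n"
-- ===== Notes on version B (the rewrite author's own statement) =====
-- stated objective: alternative
-- what changed: Replaces the copy loop with its inserted flag by first locating the index of the first 'def ' line (enumerate/next) and splicing the comment in with slices.
import Mathlib
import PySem

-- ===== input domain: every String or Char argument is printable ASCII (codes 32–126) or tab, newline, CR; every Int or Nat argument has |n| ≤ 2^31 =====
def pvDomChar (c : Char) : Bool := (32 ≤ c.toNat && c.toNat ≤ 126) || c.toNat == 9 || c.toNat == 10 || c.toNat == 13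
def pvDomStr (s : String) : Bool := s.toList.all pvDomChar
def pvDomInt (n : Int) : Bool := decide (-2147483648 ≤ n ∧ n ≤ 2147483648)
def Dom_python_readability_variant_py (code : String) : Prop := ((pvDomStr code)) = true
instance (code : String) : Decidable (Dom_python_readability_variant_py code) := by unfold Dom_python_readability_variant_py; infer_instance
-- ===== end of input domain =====

-- B replaces A's copy loop with an inserted flag by locating the first 'def ' line and splicing with slices; objective: alternative decomposition.

-- ===== PORT A =====
def python_readability_variant_py (code : String) : String :=
  let lines := PySem.Str.splitlines code
  let st := lines.foldl
    (fun (s : List String × Bool) line =>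
      let out := s.1 ++ [line]
      if PySem.Str.startswith line "def " && !s.2 then
        (out ++ ["    # Synthesis strategy: readability-biased"], true)
      else (out, s.2)) ([], false)
  let out := if !st.2 then st.1 ++ ["# Synthesis strategy: readability-biased"] else st.1
  PySem.Str.join "\n" out ++ "\n"

-- ===== PORT B =====
def python_readability_variant_py_alt (code : String) : String :=
  let lines := PySem.Str.splitlines code
  let result :=
    match lines.findIdx? (fun ln => PySem.Str.startswith ln "def ") with
    | none => lines ++ ["# Synthesis strategy: readability-biased"]
    | some i => lines.take (i + 1) ++ ["    # Synthesis strategy: readability-biased"] ++ lines.drop (i + 1)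
  PySem.Str.join "\n" result ++ "\n"

-- ===== PRECONDITION & SPEC =====
def Spec_python_readability_variant_py (code : String) (out : String) : Prop := out = python_readability_variant_py_alt code
instance (code : String) (out : String) : Decidable (Spec_python_readability_variant_py code out) := by unfold Spec_python_readability_variant_py; infer_instance

-- ===== CLAIM (what is proved, stated in full; the proofs are below) =====
def Claim_equal_python_readability_variant_py : Prop := ∀ (code : String), Dom_python_readability_variant_py code → Spec_python_readability_variant_py code (python_readability_variant_py code)

-- ===== LEMMAS AND PROOFS =====

def pvStep : List String × Bool → String → List String × Bool :=
  fun s line =>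
    let out := s.1 ++ [line]
    if PySem.Str.startswith line "def " && !s.2 then
      (out ++ ["    # Synthesis strategy: readability-biased"], true)
    else (out, s.2)

lemma pvLoop_true (lines : List String) (acc : List String) :
    lines.foldl pvStep (acc, true) = (acc ++ lines, true) := by
  induction lines generalizing acc with
  | nil => simp
  | cons hd tl ih => simp [pvStep, ih]

lemma pvLoop_false (lines : List String) (acc : List String) :
    lines.foldl pvStep (acc, false) =
      match lines.findIdx? (fun ln => PySem.Str.startswith ln "def ") with
      | none => (acc ++ lines, false)
      | some i => (acc ++ lines.take (i + 1) ++ ["    # Synthesis strategy: readability-biased"] ++ lines.drop (i + 1), true) := by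
  induction lines generalizing acc with
  | nil => simp
  | cons hd tl ih =>
    simp only [List.foldl_cons, pvStep, List.findIdx?_cons, PySem.Str.startswith] at *
    rw [show "def ".toList = ['d', 'e', 'f', ' '] from by decide] at ih ⊢
    by_cases h : PySem.Chars.startswith hd.toList ['d', 'e', 'f', ' '] = true
    · simp [h, pvLoop_true]
    · rw [if_neg (by simp [h]), if_neg h, ih]
      cases htl : tl.findIdx? (fun ln => PySem.Chars.startswith ln.toList ['d', 'e', 'f', ' ']) with
      | none => simp
      | some i => simp [List.take_succ_cons, List.drop_succ_cons]

-- ===== VERDICT (by name: the statement is the Claim_ definition above) =====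
theorem python_readability_variant_py_spec : Claim_equal_python_readability_variant_py := by
  intro code _
  unfold Spec_python_readability_variant_py python_readability_variant_py python_readability_variant_py_alt
  simp only []
  rw [show (fun (s : List String × Bool) line =>
      let out := s.1 ++ [line]
      if PySem.Str.startswith line "def " && !s.2 then
        (out ++ ["    # Synthesis strategy: readability-biased"], true)
      else (out, s.2)) = pvStep from rfl]
  rw [pvLoop_false]
  cases h : (PySem.Str.splitlines code).findIdx? (fun ln => PySem.Str.startswith ln "def ") with
  | none => simp
  | some i => simp
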